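-- pv_equiv track=rewrite | github.com/austral-prog/tp-9-lulibetelu | dicts.py | decrement_items
-- ===== SOURCE A (Python) =====
-- def decrement_items(inventory, items):
--     my_map = inventory
--     for i in items:
--         if i in my_map:
--             my_map[i] -=1
--             if my_map[i] < 0:
--                 my_map[i] = 0
--     return my_map
-- ===== SOURCE B (Python) =====
-- def decrement_items(inventory, items):
--     counts = {}
--     for i in items:
--         counts[i] = counts.get(i, 0) + 1
--     for key, cnt in counts.items():
--         if key in inventory:
--             inventory[key] = max(0, inventory[key] - cnt)
--     return inventory
-- ===== Notes on version B (the rewrite author's own statement) =====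
-- stated objective: idiomatic
-- what changed: Replaces A's per-item loop of single decrements (floored at zero each step) by a two-phase aggregate-then-apply: build a count per item once, then update each distinct key with max(0, v - count).
import Mathlib
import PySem

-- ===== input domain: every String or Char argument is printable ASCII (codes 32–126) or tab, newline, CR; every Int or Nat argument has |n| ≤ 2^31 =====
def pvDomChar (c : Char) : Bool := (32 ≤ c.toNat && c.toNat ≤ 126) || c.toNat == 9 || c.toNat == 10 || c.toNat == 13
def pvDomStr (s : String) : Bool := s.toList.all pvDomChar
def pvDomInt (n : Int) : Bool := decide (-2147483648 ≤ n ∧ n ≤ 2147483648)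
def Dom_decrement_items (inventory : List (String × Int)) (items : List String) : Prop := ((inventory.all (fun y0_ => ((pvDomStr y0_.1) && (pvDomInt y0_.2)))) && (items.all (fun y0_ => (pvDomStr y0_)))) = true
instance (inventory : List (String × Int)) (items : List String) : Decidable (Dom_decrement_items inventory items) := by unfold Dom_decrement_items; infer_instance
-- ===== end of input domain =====

-- B replaces A's per-item decrement loop by an aggregate-then-apply pass over distinct keys (idiomatic restructuring; return value only — both Pythons mutate and return the given inventory dict).


-- ===== PORT A =====
-- assoc-list dict primitives (dict lookup = first match; assignment overwrites in place)
def dictGet? : List (String × Int) → String → Option Int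
  | [], _ => none
  | (k, v) :: r, i => if k == i then some v else dictGet? r i

def dictSet : List (String × Int) → String → Int → List (String × Int)
  | [], i, w => [(i, w)]
  | (k, v) :: r, i, w => if k == i then (k, w) :: r else (k, v) :: dictSet r i w

-- one iteration of A's loop body: if i in my_map: my_map[i] -= 1; if my_map[i] < 0: my_map[i] = 0
def stepA (m : List (String × Int)) (i : String) : List (String × Int) :=
  if (dictGet? m i).isSome then
    let m1 := dictSet m i ((dictGet? m i).getD 0 - 1)
    if (dictGet? m1 i).getD 0 < 0 then dictSet m1 i 0 else m1
  else m

def decrement_items (inventory : List (String × Int)) (items : List String) : List (String × Int) :=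
  items.foldl stepA inventory

-- ===== PORT B =====
-- one iteration of B's second loop: if key in inventory: inventory[key] = max(0, inventory[key] - cnt)
def stepB (m : List (String × Int)) (kc : String × Int) : List (String × Int) :=
  if (dictGet? m kc.1).isSome then
    dictSet m kc.1 (max 0 ((dictGet? m kc.1).getD 0 - kc.2))
  else m

def decrement_items_alt (inventory : List (String × Int)) (items : List String) : List (String × Int) :=
  -- counts = {}; for i in items: counts[i] = counts.get(i, 0) + 1
  let counts : PySem.Dict String Int := items.foldl (fun d x => d.insert x (d.getD x 0 + 1)) PySem.Dict.empty
  -- for key, cnt in counts.items(): if key in inventory: inventory[key] = max(0, inventory[key] - cnt)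
  counts.items.foldl stepB inventory

-- ===== PRECONDITION & SPEC =====
def Spec_decrement_items (inventory : List (String × Int)) (items : List String) (out : List (String × Int)) : Prop := out = decrement_items_alt inventory items
instance (inventory : List (String × Int)) (items : List String) (out : List (String × Int)) : Decidable (Spec_decrement_items inventory items out) := by unfold Spec_decrement_items; infer_instance

-- ===== CLAIM (what is proved, stated in full; the proofs are below) =====
def Claim_equal_decrement_items : Prop := ∀ (inventory : List (String × Int)) (items : List String), Dom_decrement_items inventory items → Spec_decrement_items inventory items (decrement_items inventory items)

-- ===== LEMMAS AND PROOFS =====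

-- n-fold application of A's floored single decrement
def applyN : Nat → Int → Int
  | 0, v => v
  | n + 1, v => applyN n (max 0 (v - 1))

-- canonical form of A's fold: each inventory entry's FIRST occurrence receives its item count
def specA : List (String × Int) → List String → List (String × Int)
  | [], _ => []
  | (k, v) :: r, its => (k, applyN (its.count k) v) :: specA r (its.filter (fun i => !(i == k)))

-- canonical form of B's fold over the counter's entries
def specB : List (String × Int) → List (String × Int) → List (String × Int)
  | [], _ => []
  | (k, v) :: r, es =>
      (k, (es.filter (fun e => e.1 == k)).foldl (fun v e => max 0 (v - e.2)) v) ::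
        specB r (es.filter (fun e => !(e.1 == k)))

theorem dictGet?_dictSet_self (m : List (String × Int)) (i : String) (w : Int) :
    dictGet? (dictSet m i w) i = some w := by
  induction m with
  | nil => simp [dictSet, dictGet?]
  | cons p r ih =>
    obtain ⟨k, v⟩ := p
    by_cases h : k = i <;> simp [dictSet, dictGet?, h, ih]

theorem stepA_nil (i : String) : stepA [] i = [] := by simp [stepA, dictGet?]

theorem stepA_cons (k : String) (v : Int) (r : List (String × Int)) (i : String) :
    stepA ((k, v) :: r) i =
      if k = i then (k, max 0 (v - 1)) :: r else (k, v) :: stepA r i := by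
  by_cases h : k = i
  · simp only [stepA, dictGet?, h, beq_self_eq_true, if_true, Option.isSome_some,
      Option.getD_some, dictSet, dictGet?_dictSet_self]
    split_ifs with hv
    · have hm : max 0 (v - 1) = 0 := by omega
      rw [hm]
    · have hm : max 0 (v - 1) = v - 1 := by omega
      rw [hm]
  · cases hg : dictGet? r i with
    | none => simp [stepA, dictGet?, h, hg]
    | some g =>
      simp only [stepA, dictGet?, beq_iff_eq, h, if_false, hg, Option.isSome_some, if_true,
        Option.getD_some, dictSet, dictGet?_dictSet_self]
      by_cases hlt : g - 1 < 0 <;> simp [hlt, dictSet, beq_iff_eq, h, dictGet?_dictSet_self]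

theorem stepB_nil (e : String × Int) : stepB [] e = [] := by simp [stepB, dictGet?]

theorem stepB_cons (k : String) (v : Int) (r : List (String × Int)) (e : String × Int) :
    stepB ((k, v) :: r) e =
      if k = e.1 then (k, max 0 (v - e.2)) :: r else (k, v) :: stepB r e := by
  by_cases h : k = e.1
  · simp [stepB, dictGet?, dictSet, h]
  · simp only [stepB, dictGet?, dictSet, beq_iff_eq, h, if_false]
    cases hg : dictGet? r e.1 with
    | none => simp [hg]
    | some g => simp [hg, dictSet, beq_iff_eq, h]

theorem foldA_nil (its : List String) : its.foldl stepA [] = [] := by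
  induction its with
  | nil => rfl
  | cons i is ih => simp [List.foldl_cons, stepA_nil, ih]

theorem foldA_cons (its : List String) (k : String) (v : Int) (r : List (String × Int)) :
    its.foldl stepA ((k, v) :: r) =
      (k, applyN (its.count k) v) :: (its.filter (fun i => !(i == k))).foldl stepA r := by
  induction its generalizing v r with
  | nil => simp [applyN]
  | cons i is ih =>
    by_cases h : k = i
    · subst h
      rw [List.foldl_cons, stepA_cons, if_pos rfl, ih]
      simp [List.count_cons, applyN, Nat.add_comm]
    · rw [List.foldl_cons, stepA_cons, if_neg h, ih]
      have h' : ¬(i = k) := fun hh => h hh.symm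
      simp [List.count_cons, h', List.filter_cons]

theorem A_eq_specA (inv : List (String × Int)) (its : List String) :
    its.foldl stepA inv = specA inv its := by
  induction inv generalizing its with
  | nil => simp [foldA_nil, specA]
  | cons p r ih =>
    obtain ⟨k, v⟩ := p
    rw [foldA_cons, specA, ih]

theorem foldB_nil (es : List (String × Int)) : es.foldl stepB [] = [] := by
  induction es with
  | nil => rfl
  | cons e es ih => simp [List.foldl_cons, stepB_nil, ih]

theorem foldB_cons (es : List (String × Int)) (k : String) (v : Int) (r : List (String × Int)) :
    es.foldl stepB ((k, v) :: r) =
      (k, (es.filter (fun e => e.1 == k)).foldl (fun v e => max 0 (v - e.2)) v) ::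
        (es.filter (fun e => !(e.1 == k))).foldl stepB r := by
  induction es generalizing v r with
  | nil => simp
  | cons e es ih =>
    by_cases h : k = e.1
    · simp only [List.foldl_cons, stepB_cons, if_pos h]
      rw [ih]
      simp [List.filter_cons, h.symm]
    · simp only [List.foldl_cons, stepB_cons, if_neg h]
      rw [ih]
      have h' : ¬(e.1 = k) := fun hh => h hh.symm
      simp [List.filter_cons, h']

theorem B_eq_specB (inv : List (String × Int)) (es : List (String × Int)) :
    es.foldl stepB inv = specB inv es := by
  induction inv generalizing es with
  | nil => simp [foldB_nil, specB]
  | cons p r ih =>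
    obtain ⟨k, v⟩ := p
    rw [foldB_cons, specB, ih]

theorem applyN_succ_closed (n : Nat) (v : Int) :
    applyN (n + 1) v = max 0 (v - (n + 1 : Nat)) := by
  induction n generalizing v with
  | zero => simp [applyN]
  | succ m ih =>
    show applyN (m + 1) (max 0 (v - 1)) = _
    rw [ih]
    push_cast
    omega

-- A and B agree whenever the entry list es carries exactly the positive item counts of its
theorem specA_eq_specB (inv : List (String × Int)) (its : List String) (es : List (String × Int))
    (H : ∀ k, es.filter (fun e => e.1 == k) =
      if its.count k = 0 then [] else [(k, (its.count k : Int))]) :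
    specA inv its = specB inv es := by
  induction inv generalizing its es with
  | nil => rfl
  | cons p r ih =>
    obtain ⟨k, v⟩ := p
    rw [specA, specB]
    have hhead : applyN (its.count k) v =
        (es.filter (fun e => e.1 == k)).foldl (fun v e => max 0 (v - e.2)) v := by
      rw [H k]
      cases hc : its.count k with
      | zero => simp [applyN]
      | succ n => simp [applyN_succ_closed, hc]
    rw [hhead]
    congr 1
    -- tails: the filtered hypothesis is preserved
    apply ih
    intro k'
    by_cases hk : k' = k
    · subst hk
      rw [List.filter_filter]
      have : List.count k' (List.filter (fun i => !i == k') its) = 0 := by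
        rw [List.count_eq_zero]; simp
      simp [this]
    · rw [List.filter_filter]
      have hpred : ∀ e : String × Int, ((e.1 == k') && !(e.1 == k)) = (e.1 == k') := by
        intro e
        by_cases he : e.1 = k' <;> simp [he, hk, Ne.symm]
      rw [List.filter_congr (fun e _ => hpred e), H k']
      have hcnt : (its.filter (fun i => !(i == k))).count k' = its.count k' := by
        rw [List.count_filter]
        simp [Ne.symm, hk]
      rw [hcnt]

theorem counter_filter (its : List String) (k : String) :
    (PySem.Dict.counter its).items.filter (fun e => e.1 == k) =
      if its.count k = 0 then [] else [(k, (its.count k : Int))] := by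
  rw [PySem.Dict.items_counter]
  rw [List.filter_map]
  have : ((PySem.Set.ofList its).filter ((fun e : String × Int => e.1 == k) ∘
      (fun x => (x, (its.count x : Int))))) = (PySem.Set.ofList its).filter (fun x => x == k) := rfl
  rw [this, List.filter_beq]
  by_cases hmem : k ∈ its
  · have h1 : (PySem.Set.ofList its).count k = 1 :=
      List.count_eq_one_of_mem (PySem.Set.nodup_ofList its) ((PySem.Set.mem_ofList its k).2 hmem)
    have h0 : its.count k ≠ 0 := by
      simpa [List.count_eq_zero] using hmem
    simp [h1, h0]
  · have h1 : (PySem.Set.ofList its).count k = 0 := by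
      rw [List.count_eq_zero]
      exact fun hc => hmem ((PySem.Set.mem_ofList its k).1 hc)
    have h0 : its.count k = 0 := List.count_eq_zero.2 hmem
    simp [h1, h0]

-- ===== VERDICT (by name: the statement is the Claim_ definition above) =====
theorem decrement_items_spec : Claim_equal_decrement_items := by
  intro inventory items _
  show decrement_items inventory items = decrement_items_alt inventory items
  unfold decrement_items decrement_items_alt
  rw [PySem.Dict.foldl_insert_getD_add_one_eq_counter]
  rw [A_eq_specA, B_eq_specB]
  exact specA_eq_specB inventory items _ (counter_filter items)
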